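-- pv_equiv track=rewrite | github.com/981377660LMT/algorithm-study | 22_专题/前缀与差分/差分数组/区间操作/Q3. 灯光调整.py | lightAdjustment
-- ===== SOURCE A (Python) =====
-- from itertools import pairwise
-- from typing import List
--
-- def lightAdjustment(brightness: List[int]) -> int:
--     pos, neg = 0, 0
--     for a, b in pairwise(brightness):
--         diff = b - a
--         if diff > 0:
--             pos += diff
--         elif diff < 0:
--             neg += -diff
--     return max(pos, neg)
-- ===== SOURCE B (Python) =====
-- def lightAdjustment(brightness):
--     if not brightness:
--         return 0
--     s, prev = 0, brightness[0]
--     for x in brightness[1:]: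
--         s += abs(x - prev)
--         prev = x
--     return (s + abs(prev - brightness[0])) // 2
-- ===== Notes on version B (the rewrite author's own statement) =====
-- stated objective: simpler
-- what changed: B sums |b-a| over adjacent pairs in one branch-free pass and returns (s + |last-first|)//2, using the telescoping identity pos-neg = last-first instead of tracking positive and negative differences separately.
import Mathlib
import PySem

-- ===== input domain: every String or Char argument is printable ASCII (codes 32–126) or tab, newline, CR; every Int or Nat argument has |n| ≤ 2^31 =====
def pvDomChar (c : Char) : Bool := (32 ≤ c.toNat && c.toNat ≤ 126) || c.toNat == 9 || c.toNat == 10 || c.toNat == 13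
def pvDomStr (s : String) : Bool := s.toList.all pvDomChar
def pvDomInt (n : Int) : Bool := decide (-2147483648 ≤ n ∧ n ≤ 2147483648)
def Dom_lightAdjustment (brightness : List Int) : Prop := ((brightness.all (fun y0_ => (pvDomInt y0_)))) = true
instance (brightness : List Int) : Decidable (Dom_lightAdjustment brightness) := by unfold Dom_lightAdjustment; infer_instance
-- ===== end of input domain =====

-- B replaces A's separate positive/negative accumulators by one branch-free |b-a| sum plus the
-- telescoping identity pos-neg = last-first, returning (s + |last-first|) // 2 (objective: simpler).

-- ===== PORT A =====
-- A's loop body: for a, b in pairwise(brightness): diff = b - a; if diff > 0: pos += diff elif diff < 0: neg += -diff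
def lightAdjStepA (st : Int × Int) (p : Int × Int) : Int × Int :=
  let diff := p.2 - p.1
  if diff > 0 then (st.1 + diff, st.2)
  else if diff < 0 then (st.1, st.2 + (-diff))
  else st

def lightAdjustment (brightness : List Int) : Int :=
  let st := (brightness.zip brightness.tail).foldl lightAdjStepA (0, 0)
  max st.1 st.2

-- ===== PORT B =====
-- B's loop: s += abs(x - prev); prev = x  (state (s, prev))
def lightAdjLoopB (s prev : Int) : List Int → Int × Int
  | [] => (s, prev)
  | x :: rest => lightAdjLoopB (s + |x - prev|) x rest

def lightAdjustment_alt (brightness : List Int) : Int :=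
  match brightness with
  | [] => 0
  | a :: rest =>
    let sp := lightAdjLoopB 0 a rest
    PySem.Int.floordiv (sp.1 + |sp.2 - a|) 2

-- ===== PRECONDITION & SPEC =====
def Spec_lightAdjustment (brightness : List Int) (out : Int) : Prop := out = lightAdjustment_alt brightness
instance (brightness : List Int) (out : Int) : Decidable (Spec_lightAdjustment brightness out) := by unfold Spec_lightAdjustment; infer_instance

-- ===== CLAIM (what is proved, stated in full; the proofs are below) =====
def Claim_equal_lightAdjustment : Prop := ∀ (brightness : List Int), Dom_lightAdjustment brightness → Spec_lightAdjustment brightness (lightAdjustment brightness)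

-- ===== LEMMAS AND PROOFS =====

-- Joint loop invariant: A's fold accumulates (P, N) (positive / negative total differences),
-- B's loop accumulates P + N and ends at a + (P - N) (telescoping).
theorem lightAdj_key (rest : List Int) : ∀ (a : Int), ∃ P N : Int, 0 ≤ P ∧ 0 ≤ N ∧
    (∀ pos neg : Int, ((a :: rest).zip rest).foldl lightAdjStepA (pos, neg) = (pos + P, neg + N)) ∧
    (∀ s : Int, (lightAdjLoopB s a rest).1 = s + (P + N)) ∧
    (∀ s : Int, (lightAdjLoopB s a rest).2 = a + (P - N)) := by
  induction rest with
  | nil =>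
    intro a
    exact ⟨0, 0, le_refl 0, le_refl 0,
      fun pos neg => by simp [List.zip],
      fun s => by simp [lightAdjLoopB],
      fun s => by simp [lightAdjLoopB]⟩
  | cons b r ih =>
    intro a
    obtain ⟨P', N', hP', hN', hA, hB1, hB2⟩ := ih b
    refine ⟨(if 0 < b - a then b - a else 0) + P',
            (if b - a < 0 then -(b - a) else 0) + N', ?_, ?_, ?_, ?_, ?_⟩
    · split_ifs <;> omega
    · split_ifs <;> omega
    · intro pos neg
      have hstep : lightAdjStepA (pos, neg) (a, b)
          = (pos + (if 0 < b - a then b - a else 0), neg + (if b - a < 0 then -(b - a) else 0)) := by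
        unfold lightAdjStepA
        simp only [gt_iff_lt]
        split_ifs <;> rw [Prod.mk.injEq] <;> omega
      calc ((a :: b :: r).zip (b :: r)).foldl lightAdjStepA (pos, neg)
          = ((b :: r).zip r).foldl lightAdjStepA (lightAdjStepA (pos, neg) (a, b)) := by
            simp [List.zip]
        _ = (pos + ((if 0 < b - a then b - a else 0) + P'),
             neg + ((if b - a < 0 then -(b - a) else 0) + N')) := by
            rw [hstep, hA, Prod.mk.injEq]; constructor <;> ring
    · intro s
      have : (lightAdjLoopB s a (b :: r)).1 = (lightAdjLoopB (s + |b - a|) b r).1 := rfl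
      rw [this, hB1]
      rcases le_total a b with h | h
      · rw [abs_of_nonneg (by omega)]; split_ifs <;> omega
      · rw [abs_of_nonpos (by omega)]; split_ifs <;> omega
    · intro s
      have : (lightAdjLoopB s a (b :: r)).2 = (lightAdjLoopB (s + |b - a|) b r).2 := rfl
      rw [this, hB2]
      split_ifs <;> omega

-- ===== VERDICT (by name: the statement is the Claim_ definition above) =====
theorem lightAdjustment_spec : Claim_equal_lightAdjustment := by
  intro brightness _
  unfold Spec_lightAdjustment lightAdjustment lightAdjustment_alt
  match brightness with
  | [] => simp [List.zip]
  | a :: rest =>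
    obtain ⟨P, N, hP, hN, hA, hB1, hB2⟩ := lightAdj_key rest a
    simp only [List.tail_cons, hA 0 0, hB1 0, hB2 0]
    have h2 : (0:Int) < 2 := by omega
    rw [PySem.Int.floordiv_eq_ediv_of_pos h2]
    rcases le_total N P with h | h
    · rw [max_eq_left (by omega : (0:Int) + N ≤ 0 + P)]
      have e : (0:Int) + (P + N) + |a + (P - N) - a| = 2 * P := by
        rw [show a + (P - N) - a = P - N by ring, abs_of_nonneg (by omega)]; ring
      rw [e]; omega
    · rw [max_eq_right (by omega : (0:Int) + P ≤ 0 + N)]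
      have e : (0:Int) + (P + N) + |a + (P - N) - a| = 2 * N := by
        rw [show a + (P - N) - a = P - N by ring, abs_of_nonpos (by omega)]; ring
      rw [e]; omega
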